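-- pv_equiv track=rewrite | github.com/FinemechanicPub/problems | yandex_training_7/part_1/solution_h.py | simple
-- ===== SOURCE A (Python) =====
-- def score(job: str) -> tuple[int, int]:
--     """
--     Score gained if job starts at odd or even day
--     >>> score("DSD")
--     (0, 1)
--     >>> score("SS")
--     (1, 1)
--     >>> score("DD")
--     (0, 0)
--     >>> score("SDD")
--     (1, 0)
--     """
--     return (
--         job[0::2].count("S"),
--         job[1::2].count("S"),
--     )
--
-- def simple(jobs: list[str]) -> int:
--     """
--     >>> simple(["DSD", "SS", "DD", "SDD"])
--     3
--     >>> simple(["DSD", "SS", "DDS", "SDD"])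
--     4
--     >>> simple(["S"])
--     1
--     >>> simple(["D"])
--     0
--     >>> simple(['SS', 'DDS', 'S', 'DD'])
--     2
--     >>> simple(['SD', 'SDDSS', 'SSSSDSDS', 'DSDDDSSD', 'SDSSDDS'])
--     11
--     >>> simple(['SDSDDSSDDS', 'SSDDSD', 'SDSSDSSDS', 'SSSDDSSDSS', 'DDDDSDD'])
--     13
--     """
--     odd_jobs = sorted(
--         (score(job) for job in jobs if len(job) & 1),
--         key=lambda s: s[0] - s[1],
--     )
--     half = len(odd_jobs) // 2
--     count = (
--         sum(odd_jobs[i][1] for i in range(half))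
--         + sum(odd_jobs[i][0] for i in range(half, len(odd_jobs)))
--     )
--     if odd_jobs:
--         count += sum(max(score(job)) for job in jobs if not len(job) & 1)
--     else:
--         count += sum(score(job)[0] for job in jobs if not len(job) & 1)
--     return count
-- ===== SOURCE B (Python) =====
-- def _sum_smallest(xs, k):
--     """Sum of the k smallest elements of xs (quickselect partitioning, O(len) expected)."""
--     if k <= 0:
--         return 0
--     if len(xs) <= k:
--         return sum(xs)
--     p = xs[len(xs) // 2]
--     lt = [x for x in xs if x < p]
--     eq = [x for x in xs if x == p]
--     gt = [x for x in xs if x > p]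
--     if k <= len(lt):
--         return _sum_smallest(lt, k)
--     if k <= len(lt) + len(eq):
--         return sum(lt) + p * (k - len(lt))
--     return sum(lt) + p * len(eq) + _sum_smallest(gt, k - len(lt) - len(eq))
--
--
-- def simple(jobs: list[str]) -> int:
--     odd_sum = 0          # sum of even-position scores of odd-length jobs
--     ds = []              # score differences (even-start minus odd-start) of odd-length jobs
--     even_first = 0       # sum of even-position scores of even-length jobs
--     even_best = 0        # sum of best-of-the-two scores of even-length jobs
--     for job in jobs:
--         e = o = 0
--         for i, c in enumerate(job):
--             if c == 'S':
--                 if i % 2 == 0: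
--                     e += 1
--                 else:
--                     o += 1
--         if len(job) % 2 == 1:
--             odd_sum += e
--             ds.append(e - o)
--         else:
--             even_first += e
--             even_best += e if e >= o else o
--     if ds:
--         return odd_sum - _sum_smallest(ds, len(ds) // 2) + even_best
--     return even_first
-- ===== Notes on version B (the rewrite author's own statement) =====
-- stated objective: faster
-- what changed: Replaces the full sort of the odd-length jobs' score pairs by a quickselect-style recursive partition that sums the half smallest score differences in expected linear time, and computes each job's two scores in a single indexed character pass instead of two stride-2 slices.
import Mathlib
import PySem

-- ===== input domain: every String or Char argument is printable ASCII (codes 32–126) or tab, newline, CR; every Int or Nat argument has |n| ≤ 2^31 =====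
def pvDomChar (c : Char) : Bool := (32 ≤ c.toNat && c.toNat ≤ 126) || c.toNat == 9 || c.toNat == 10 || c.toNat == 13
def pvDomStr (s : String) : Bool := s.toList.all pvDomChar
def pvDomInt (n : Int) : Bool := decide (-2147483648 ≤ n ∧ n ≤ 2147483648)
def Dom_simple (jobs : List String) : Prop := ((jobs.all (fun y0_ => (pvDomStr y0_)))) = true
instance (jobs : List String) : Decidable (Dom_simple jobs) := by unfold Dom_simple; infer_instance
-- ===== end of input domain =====

-- B replaces A's full sort of the odd-length jobs' scores by a quickselect-style
-- recursive partition that sums the half smallest score differences directly,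
-- and computes each job's two scores in one indexed pass instead of two slices.

-- ===== PORT A =====
def pyScore (job : String) : Int × Int :=
  (↑(PySem.Str.count ((PySem.Str.slice? job (some 0) none 2).getD "") "S"),
   ↑(PySem.Str.count ((PySem.Str.slice? job (some 1) none 2).getD "") "S"))

def simple (jobs : List String) : Int :=
  let oddJobs := PySem.List.sorted
      ((jobs.filter (fun job => PySem.Int.band (PySem.Str.len job) 1 != 0)).map pyScore)
      (fun s => s.1 - s.2)
  let half := PySem.Int.floordiv ↑oddJobs.length 2
  let count :=
    ((PySem.List.pyRange 0 half).map (fun i => (PySem.List.pyGetD oddJobs i (0, 0)).2)).sum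
    + ((PySem.List.pyRange half ↑oddJobs.length).map (fun i => (PySem.List.pyGetD oddJobs i (0, 0)).1)).sum
  if oddJobs ≠ [] then
    count + ((jobs.filter (fun job => !(PySem.Int.band (PySem.Str.len job) 1 != 0))).map
      (fun job => max (pyScore job).1 (pyScore job).2)).sum
  else
    count + ((jobs.filter (fun job => !(PySem.Int.band (PySem.Str.len job) 1 != 0))).map
      (fun job => (pyScore job).1)).sum

-- ===== PORT B =====
def altScore (job : String) : Int × Int :=
  (PySem.List.enumerate job.toList).foldl
    (fun eo ic =>
      if ic.2 = 'S' then
        if PySem.Int.mod ic.1 2 = 0 then (eo.1 + 1, eo.2) else (eo.1, eo.2 + 1)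
      else eo)
    (0, 0)

-- used by sumSmallest's termination argument (the pivot is an element of xs)
theorem pivot_mem (xs : List Int) (hne : xs ≠ []) :
    PySem.List.pyGetD xs (PySem.Int.floordiv ↑xs.length 2) 0 ∈ xs := by
  have hlen : 0 < xs.length := List.length_pos_iff.mpr hne
  have h2 : PySem.Int.floordiv (↑xs.length) 2 = ((xs.length / 2 : Nat) : Int) := by
    exact_mod_cast PySem.Int.floordiv_natCast xs.length 2
  rw [h2, PySem.List.pyGetD_natCast, List.getD_eq_getElem _ _ (by omega)]
  exact List.getElem_mem _

def sumSmallest (xs : List Int) (k : Int) : Int :=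
  if k ≤ 0 then 0
  else if (xs.length : Int) ≤ k then xs.sum
  else
    let p := PySem.List.pyGetD xs (PySem.Int.floordiv ↑xs.length 2) 0
    let lt := xs.filter (fun x => x < p)
    let eq := xs.filter (fun x => x = p)
    let gt := xs.filter (fun x => p < x)
    if k ≤ (lt.length : Int) then sumSmallest lt k
    else if k ≤ (lt.length : Int) + eq.length then lt.sum + p * (k - lt.length)
    else lt.sum + p * (eq.length : Int) + sumSmallest gt (k - lt.length - eq.length)
termination_by xs.length
decreasing_by
  all_goals
    have hlen : 0 < xs.length := by omega
    have hmem := pivot_mem xs (List.length_pos_iff.mp hlen)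
    simp only [List.length_unattach, ← List.length_attach (l := xs)]
    refine List.length_filter_lt_length_iff_exists.mpr ⟨⟨_, hmem⟩, List.mem_attach _ _, by simp⟩

def simple_alt (jobs : List String) : Int :=
  let st := jobs.foldl
    (fun st job =>
      let s := altScore job
      if PySem.Int.mod (PySem.Str.len job) 2 = 1 then
        (st.1 + s.1, st.2.1 ++ [s.1 - s.2], st.2.2.1, st.2.2.2)
      else
        (st.1, st.2.1, st.2.2.1 + s.1, st.2.2.2 + if s.2 ≤ s.1 then s.1 else s.2))
    ((0 : Int), ([] : List Int), (0 : Int), (0 : Int))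
  if st.2.1 ≠ [] then
    st.1 - sumSmallest st.2.1 (PySem.Int.floordiv ↑st.2.1.length 2) + st.2.2.2
  else st.2.2.1

-- ===== PRECONDITION & SPEC =====
def Spec_simple (jobs : List String) (out : Int) : Prop := out = simple_alt jobs
instance (jobs : List String) (out : Int) : Decidable (Spec_simple jobs out) := by unfold Spec_simple; infer_instance

-- ===== CLAIM (what is proved, stated in full; the proofs are below) =====
def Claim_equal_simple : Prop := ∀ (jobs : List String), Dom_simple jobs → Spec_simple jobs (simple jobs)

-- ===== LEMMAS AND PROOFS =====

-- every other element, starting at index 0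
def eoL : List Char → List Char
  | [] => []
  | [a] => [a]
  | a :: _ :: t => a :: eoL t

-- (even-index 'S' count, odd-index 'S' count) of a character list
def cnt : List Char → Int × Int
  | [] => (0, 0)
  | c :: t => ((if c = 'S' then 1 else 0) + (cnt t).2, (cnt t).1)

def sortI (xs : List Int) : List Int := PySem.List.sorted xs (fun x => x)

theorem eoL_cons (c : Char) (t : List Char) : eoL (c :: t) = c :: eoL t.tail := by
  cases t <;> simp [eoL]

theorem countgo_single (c : Char) (fuel : Nat) : ∀ (l : List Char) (acc : Nat), l.length ≤ fuel →
    PySem.Chars.count.go [c] fuel l acc = acc + l.count c := by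
  induction fuel with
  | zero =>
    intro l acc h
    cases l with
    | nil => simp [PySem.Chars.count.go]
    | cons hd t => simp at h
  | succ n ih =>
    intro l acc h
    cases l with
    | nil => simp [PySem.Chars.count.go]
    | cons hd t =>
      simp only [PySem.Chars.count.go]
      by_cases hc : hd = c
      · subst hc
        simp [List.isPrefixOf, ih t (acc + 1) (by simpa using h)]
        omega
      · simp [List.isPrefixOf, Ne.symm hc, hc, ih t acc (by simpa using h)]

theorem count_single (c : Char) (l : List Char) : PySem.Chars.count l [c] = l.count c := by
  simpa [PySem.Chars.count] using countgo_single c l.length l 0 le_rfl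

theorem fm_eo (cs : List Char) :
    List.filterMap (fun k : Nat => cs[2 * k]?) (List.range ((cs.length + 1) / 2)) = eoL cs := by
  induction cs using eoL.induct with
  | case1 => simp [eoL]
  | case2 a => simp [eoL, List.range_succ]
  | case3 a b t ih =>
    have hlen : ((a :: b :: t).length + 1) / 2 = (t.length + 1) / 2 + 1 := by
      simp; omega
    rw [eoL, hlen, List.range_succ_eq_map, List.filterMap_cons]
    simp only [List.filterMap_map]
    have h0 : (a :: b :: t)[2 * 0]? = some a := by simp
    have hstep : ∀ k : Nat, (a :: b :: t)[2 * (k + 1)]? = t[2 * k]? := by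
      intro k
      have h2 : 2 * (k + 1) = 2 * k + 1 + 1 := by ring
      rw [h2]; simp
    rw [h0]
    simp only [Function.comp_def, hstep]
    rw [ih]

theorem slice_even (cs : List Char) : PySem.List.slice? cs (some 0) none 2 = some (eoL cs) := by
  rw [← fm_eo]
  simp only [PySem.List.slice?, PySem.List.sliceIndices]
  norm_num
  have hc : (if 0 < cs.length then (((cs.length : Int) + 2 - 1) / 2).toNat else 0)
      = (cs.length + 1) / 2 := by split <;> omega
  have hf : ∀ x : Nat, (2 * (x : Int)).toNat = 2 * x := by intro x; omega
  simp only [hc, hf]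

theorem slice_odd (cs : List Char) : PySem.List.slice? cs (some 1) none 2 = some (eoL cs.tail) := by
  cases cs with
  | nil => simp [PySem.List.slice?, PySem.List.sliceIndices, eoL]
  | cons c t =>
    rw [show (c :: t).tail = t from rfl, ← fm_eo]
    simp only [PySem.List.slice?, PySem.List.sliceIndices]
    norm_num
    have hc : (if 0 < t.length then (((t.length : Int) + 2 - 1) / 2).toNat else 0)
        = (t.length + 1) / 2 := by split <;> omega
    have hf : ∀ x : Nat, (c :: t)[((1 : Int) + 2 * (x : Int)).toNat]? = t[2 * x]? := by
      intro x
      rw [show ((1 : Int) + 2 * (x : Int)).toNat = 2 * x + 1 by omega]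
      simp
    simp only [hf, hc]

theorem cnt_spec (cs : List Char) :
    cnt cs = (↑((eoL cs).count 'S'), ↑((eoL cs.tail).count 'S')) := by
  induction cs with
  | nil => simp [cnt, eoL]
  | cons c t ih =>
    rw [cnt, eoL_cons, ih]
    simp only [List.tail_cons, List.count_cons]
    by_cases hc : c = 'S' <;> simp [hc] <;> push_cast <;> ring

theorem slice_str (job : String) (a : Option Int) (res : List Char)
    (h : PySem.List.slice? job.toList a none 2 = some res) :
    ((PySem.Str.slice? job a none 2).getD "").toList = res := by
  have hm := PySem.Str.slice?_map job a none 2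
  rw [PySem.Chars.slice?_eq_listSlice?, h] at hm
  cases hs : PySem.Str.slice? job a none 2 with
  | none => rw [hs] at hm; simp at hm
  | some s => rw [hs] at hm; simp at hm; simpa [hm] using hm

theorem pyScore_eq (job : String) : pyScore job = cnt job.toList := by
  rw [cnt_spec, pyScore]
  have h0 := slice_str job (some 0) _ (slice_even job.toList)
  have h1 := slice_str job (some 1) _ (slice_odd job.toList)
  rw [PySem.Str.count_eq, PySem.Str.count_eq, h0, h1]
  norm_num [count_single, show "S".toList = ['S'] from rfl]

theorem alt_fold (cs : List Char) : ∀ (s e o : Int),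
    (PySem.List.enumerate cs s).foldl
      (fun eo ic =>
        if ic.2 = 'S' then
          if PySem.Int.mod ic.1 2 = 0 then (eo.1 + 1, eo.2) else (eo.1, eo.2 + 1)
        else eo) (e, o)
    = if PySem.Int.mod s 2 = 0 then (e + (cnt cs).1, o + (cnt cs).2)
      else (e + (cnt cs).2, o + (cnt cs).1) := by
  induction cs with
  | nil =>
    intro s e o
    rw [PySem.List.enumerate_nil]
    simp only [List.foldl_nil, cnt]
    split <;> simp
  | cons c t ih =>
    intro s e o
    rw [PySem.List.enumerate_cons, List.foldl_cons]
    have hflip : (PySem.Int.mod (s + 1) 2 = 0) ↔ ¬ (PySem.Int.mod s 2 = 0) := by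
      rw [PySem.Int.mod_eq_emod_of_pos (by norm_num : (0:Int) < 2),
          PySem.Int.mod_eq_emod_of_pos (by norm_num : (0:Int) < 2)]
      omega
    by_cases hc : c = 'S' <;> by_cases hp : PySem.Int.mod s 2 = 0 <;>
      simp only [hc, hp, if_true, if_false, reduceIte, reduceCtorEq] <;>
      rw [ih (s + 1)] <;>
      simp only [hflip, hp, not_true, not_false_iff, if_true, if_false, reduceIte, cnt] <;>
      simp [hc, Prod.ext_iff] <;> omega

theorem altScore_eq (job : String) : altScore job = cnt job.toList := by
  rw [altScore, alt_fold job.toList 0 0 0]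
  norm_num [show PySem.Int.mod 0 2 = 0 from rfl]

theorem sortI_sorted (xs : List Int) : (sortI xs).Pairwise (· ≤ ·) := by
  have := PySem.List.sorted_pairwise xs (fun x => x)
  simpa [sortI] using this

theorem sortI_perm (xs : List Int) : (sortI xs).Perm xs := PySem.List.sorted_perm xs _ _

theorem sortI_unique (xs ys : List Int) (hp : ys.Perm xs) (hs : ys.Pairwise (· ≤ ·)) :
    sortI xs = ys :=
  ((sortI_perm xs).trans hp.symm).eq_of_pairwise (fun a b _ _ h1 h2 => le_antisymm h1 h2) (sortI_sorted xs) hs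

theorem perm3 (xs : List Int) (p : Int) :
    (xs.filter (fun x => x < p) ++ (xs.filter (fun x => x = p) ++ xs.filter (fun x => p < x))).Perm xs := by
  have h1 := List.filter_append_perm (fun x => decide (x < p)) xs
  have h2 := List.filter_append_perm (fun x => decide (x = p)) (xs.filter (fun x => !decide (x < p)))
  rw [List.filter_filter, List.filter_filter] at h2
  have e1 : (xs.filter fun x => decide (x = p) && !decide (x < p)) = xs.filter (fun x => x = p) := by
    apply List.filter_congr; intro x _; by_cases h : x = p <;> simp [h] <;> omega
  have e2 : (xs.filter fun x => !decide (x = p) && !decide (x < p)) = xs.filter (fun x => p < x) := by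
    apply List.filter_congr; intro x _
    by_cases h : p < x <;> simp [h] <;> omega
  rw [e1, e2] at h2
  exact (List.Perm.append_left _ h2).trans h1

theorem sortI_concat (xs : List Int) (p : Int) :
    sortI xs = sortI (xs.filter (fun x => x < p)) ++ (xs.filter (fun x => x = p)
      ++ sortI (xs.filter (fun x => p < x))) := by
  apply sortI_unique
  · exact ((sortI_perm _).append ((List.Perm.refl _).append (sortI_perm _))).trans (perm3 xs p)
  · rw [List.pairwise_append]
    refine ⟨sortI_sorted _, ?_, ?_⟩
    · rw [List.pairwise_append]
      refine ⟨?_, sortI_sorted _, ?_⟩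
      · have hall : ∀ a ∈ xs.filter (fun x => x = p), a = p := by
          intro a ha; simpa using (List.mem_filter.mp ha).2
        rw [List.eq_replicate_of_mem hall]
        exact List.pairwise_replicate.mpr (Or.inr le_rfl)
      · intro a ha b hb
        have ha' : a = p := by simpa using (List.mem_filter.mp ha).2
        have hb' : p < b := by
          have := (List.mem_filter.mp ((PySem.List.mem_sorted _ _ _ _).mp hb)).2
          simpa using this
        omega
    · intro a ha b hb
      have ha' : a < p := by
        have := (List.mem_filter.mp ((PySem.List.mem_sorted _ _ _ _).mp ha)).2
        simpa using this
      rcases List.mem_append.mp hb with hb | hb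
      · have : b = p := by simpa using (List.mem_filter.mp hb).2
        omega
      · have : p < b := by
          have := (List.mem_filter.mp ((PySem.List.mem_sorted _ _ _ _).mp hb)).2
          simpa using this
        omega

theorem length_sortI (xs : List Int) : (sortI xs).length = xs.length :=
  PySem.List.length_sorted xs _ _

theorem sum_take_all_eq (l : List Int) (p : Int) (hall : ∀ b ∈ l, b = p) (m : Nat) :
    ((l.take m).sum) = ((min m l.length : Nat) : Int) * p := by
  have h1 : l.take m = List.replicate (min m l.length) p := by
    have := List.eq_replicate_of_mem (l := l.take m) (a := p)
      (fun b hb => hall b (List.mem_of_mem_take hb))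
    rwa [List.length_take] at this
  rw [h1, List.sum_replicate, nsmul_eq_mul]

theorem sumSmallest_eq_aux : ∀ (n : Nat) (xs : List Int) (k : Int), xs.length ≤ n → 0 ≤ k →
    sumSmallest xs k = ((sortI xs).take k.toNat).sum := by
  intro n
  induction n with
  | zero =>
    intro xs k hn hk
    have hx : xs = [] := List.length_eq_zero_iff.mp (by omega)
    subst hx
    have hs : sortI ([] : List Int) = [] := (PySem.List.sorted_eq_nil_iff _ _ _).mpr rfl
    rw [sumSmallest, hs]
    split_ifs <;> simp_all <;> omega
  | succ n ih =>
    intro xs k hn hk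
    rw [sumSmallest]
    by_cases h1 : k ≤ 0
    · rw [if_pos h1]
      have : k.toNat = 0 := by omega
      simp [this]
    rw [if_neg h1]
    by_cases h2 : (xs.length : Int) ≤ k
    · rw [if_pos h2]
      rw [List.take_of_length_le (by rw [length_sortI]; omega)]
      exact ((sortI_perm xs).sum_eq).symm
    rw [if_neg h2]
    simp only []
    set p := PySem.List.pyGetD xs (PySem.Int.floordiv ↑xs.length 2) 0 with hpdef
    set L := xs.filter (fun x => x < p) with hL
    set E := xs.filter (fun x => x = p) with hE
    set G := xs.filter (fun x => p < x) with hG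
    have hne : xs ≠ [] := by intro hx; subst hx; simp at h2; omega
    have hmem : p ∈ xs := pivot_mem xs hne
    have hLlt : L.length < xs.length := by
      rw [hL]; exact List.length_filter_lt_length_iff_exists.mpr ⟨p, hmem, by simp⟩
    have hGlt : G.length < xs.length := by
      rw [hG]; exact List.length_filter_lt_length_iff_exists.mpr ⟨p, hmem, by simp⟩
    have hcat := sortI_concat xs p
    rw [← hL, ← hE, ← hG] at hcat
    have hallE : ∀ b ∈ E, b = p := by
      intro b hb; rw [hE] at hb; exact of_decide_eq_true (List.mem_filter.mp hb).2
    by_cases h3 : k ≤ (L.length : Int)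
    · rw [if_pos h3, ih L k (by omega) hk, hcat, List.take_append,
        show k.toNat - (sortI L).length = 0 from by rw [length_sortI]; omega]
      simp
    rw [if_neg h3]
    have hk1 : (sortI L).length ≤ k.toNat := by rw [length_sortI]; omega
    by_cases h4 : k ≤ (L.length : Int) + E.length
    · rw [if_pos h4, hcat, List.take_append, List.take_of_length_le hk1, List.take_append,
        show k.toNat - (sortI L).length - E.length = 0 from by rw [length_sortI]; omega,
        List.take_zero]
      rw [List.sum_append, List.sum_append, List.sum_nil, add_zero, (sortI_perm L).sum_eq,
        sum_take_all_eq E p hallE _]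
      have hmin : min (k.toNat - (sortI L).length) E.length = k.toNat - L.length := by
        rw [length_sortI]; omega
      rw [hmin]
      have hcast : ((k.toNat - L.length : Nat) : Int) = k - L.length := by omega
      rw [hcast]; ring
    · rw [if_neg h4, hcat, List.take_append, List.take_of_length_le hk1, List.take_append,
        List.take_of_length_le (by rw [length_sortI]; omega)]
      rw [List.sum_append, List.sum_append, (sortI_perm L).sum_eq,
        ih G (k - L.length - E.length) (by omega) (by omega)]
      have hEsum : E.sum = (E.length : Int) * p := by
        have hrep : E = List.replicate E.length p := List.eq_replicate_of_mem hallE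
        conv_lhs => rw [hrep]
        rw [List.sum_replicate, nsmul_eq_mul]
      have hkt : (k - ↑L.length - ↑E.length).toNat = k.toNat - (sortI L).length - E.length := by
        rw [length_sortI]; omega
      rw [hkt, hEsum]; ring

theorem sumSmallest_spec (xs : List Int) (k : Int) (hk : 0 ≤ k) :
    sumSmallest xs k = ((sortI xs).take k.toNat).sum :=
  sumSmallest_eq_aux xs.length xs k le_rfl hk

-- A-side index-sum conversions
theorem map_range_getD {α : Type} (L : List α) (h : Nat) (d : α) (hh : h ≤ L.length) :
    (List.range h).map (fun i => L.getD i d) = L.take h := by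
  apply List.ext_getElem
  · simp [hh]
  · intro i h1 h2
    simp at h1
    simp [List.getElem?_eq_getElem (show i < L.length by omega)]

theorem getD_drop {α : Type} (L : List α) (a i : Nat) (d : α) :
    (L.drop a).getD i d = L.getD (a + i) d := by
  rw [List.getD_eq_getElem?_getD, List.getD_eq_getElem?_getD, List.getElem?_drop]

theorem pyRange_map_getD {α : Type} (L : List α) (d : α) (g : α → Int) (m : Nat)
    (hm : m ≤ L.length) :
    (PySem.List.pyRange 0 ↑m).map (fun i => g (PySem.List.pyGetD L i d)) = (L.take m).map g := by
  rw [PySem.List.pyRange_zero_natCast, List.map_map]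
  have : ((fun i => g (PySem.List.pyGetD L i d)) ∘ (fun k : Nat => (k : Int)))
      = fun k : Nat => g (L.getD k d) := by
    funext k; simp [PySem.List.pyGetD_natCast]
  rw [this, show (fun k : Nat => g (L.getD k d)) = g ∘ (fun k : Nat => L.getD k d) from rfl,
    ← List.map_map, map_range_getD L m d hm]

theorem pyRange_map_getD_from {α : Type} (L : List α) (d : α) (g : α → Int) (h : Nat)
    (hh : h ≤ L.length) :
    (PySem.List.pyRange ↑h ↑L.length).map (fun i => g (PySem.List.pyGetD L i d))
      = (L.drop h).map g := by
  rw [PySem.List.pyRange_of_pos _ _ (by norm_num : (0:Int) < 1)]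
  have hcnt : (if (h : Int) < L.length then (((L.length : Int) - h + 1 - 1) / 1).toNat else 0)
      = L.length - h := by split <;> omega
  rw [hcnt, List.map_map]
  have : ((fun i => g (PySem.List.pyGetD L i d)) ∘ (fun k : Nat => (h : Int) + 1 * (k : Int)))
      = fun k : Nat => g ((L.drop h).getD k d) := by
    funext k
    have : (h : Int) + 1 * (k : Int) = ((h + k : Nat) : Int) := by push_cast; ring
    simp only [Function.comp_apply, this, PySem.List.pyGetD_natCast, getD_drop]
  rw [this, show (fun k : Nat => g ((L.drop h).getD k d)) = g ∘ (fun k : Nat => (L.drop h).getD k d)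
      from rfl, ← List.map_map, map_range_getD (L.drop h) _ d (by simp), List.take_of_length_le (by simp)]

theorem sum_map_sub {α : Type} (l : List α) (f g : α → Int) :
    (l.map (fun x => f x - g x)).sum = (l.map f).sum - (l.map g).sum := by
  induction l with
  | nil => simp
  | cons a t ih => simp [ih]; ring

theorem takeDropSum (L : List (Int × Int)) (h : Nat) :
    ((L.take h).map Prod.snd).sum + ((L.drop h).map Prod.fst).sum
      = (L.map Prod.fst).sum - ((L.map (fun s => s.1 - s.2)).take h).sum := by
  rw [← List.map_take, sum_map_sub]
  have hsplit : (L.map Prod.fst).sum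
      = ((L.take h).map Prod.fst).sum + ((L.drop h).map Prod.fst).sum := by
    conv_lhs => rw [← List.take_append_drop h L]
    rw [List.map_append, List.sum_append]
  omega

-- the parity conditions of A and B agree
theorem cond_eq (job : String) :
    ((PySem.Int.band (PySem.Str.len job) 1 != 0))
      = decide (PySem.Int.mod (PySem.Str.len job) 2 = 1) := by
  rw [PySem.Int.band_one, PySem.Str.len_eq,
    PySem.Int.mod_eq_emod_of_pos (by norm_num : (0:Int) < 2)]
  have h2 : (job.toList.length : Int) % 2 = 0 ∨ (job.toList.length : Int) % 2 = 1 := by omega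
  rcases h2 with h | h <;> rw [h] <;> decide

theorem loop_inv (jobs : List String) : ∀ (t : Int) (ds : List Int) (f m : Int),
    jobs.foldl
      (fun st job =>
        if PySem.Int.mod (PySem.Str.len job) 2 = 1 then
          (st.1 + (altScore job).1, st.2.1 ++ [(altScore job).1 - (altScore job).2],
           st.2.2.1, st.2.2.2)
        else
          (st.1, st.2.1, st.2.2.1 + (altScore job).1,
           st.2.2.2 + if (altScore job).2 ≤ (altScore job).1 then (altScore job).1
             else (altScore job).2))
      (t, ds, f, m)
    = (t + ((jobs.filter (fun j => decide (PySem.Int.mod (PySem.Str.len j) 2 = 1))).map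
          (fun j => (altScore j).1)).sum,
       ds ++ (jobs.filter (fun j => decide (PySem.Int.mod (PySem.Str.len j) 2 = 1))).map
          (fun j => (altScore j).1 - (altScore j).2),
       f + ((jobs.filter (fun j => !decide (PySem.Int.mod (PySem.Str.len j) 2 = 1))).map
          (fun j => (altScore j).1)).sum,
       m + ((jobs.filter (fun j => !decide (PySem.Int.mod (PySem.Str.len j) 2 = 1))).map
          (fun j => if (altScore j).2 ≤ (altScore j).1 then (altScore j).1
            else (altScore j).2)).sum) := by
  induction jobs with
  | nil => intro t ds f m; simp
  | cons j rest ih =>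
    intro t ds f m
    rw [List.foldl_cons]
    by_cases hj : PySem.Int.mod (PySem.Str.len j) 2 = 1 <;>
      simp only [hj, if_true, if_false, reduceIte, decide_true, decide_false,
        List.filter_cons, Bool.not_true, Bool.not_false] <;>
      rw [ih] <;>
      simp [Prod.ext_iff, List.sum_cons] <;>
      omega

-- ===== VERDICT (by name: the statement is the Claim_ definition above) =====
theorem simple_spec : Claim_equal_simple := by
  unfold Claim_equal_simple Spec_simple
  intro jobs _
  rw [simple, simple_alt]
  simp only []
  rw [loop_inv jobs 0 [] 0 0]
  set condB := fun j => decide (PySem.Int.mod (PySem.Str.len j) 2 = 1) with hcondB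
  have hfilter : (jobs.filter (fun job => PySem.Int.band (PySem.Str.len job) 1 != 0))
      = jobs.filter condB := by
    apply List.filter_congr; intro j _; exact cond_eq j
  have hfilterN : (jobs.filter (fun job => !(PySem.Int.band (PySem.Str.len job) 1 != 0)))
      = jobs.filter (fun j => !condB j) := by
    apply List.filter_congr; intro j _; rw [cond_eq j]
  rw [hfilter, hfilterN]
  have hsc : ∀ j : String, altScore j = pyScore j := fun j => by
    rw [altScore_eq, pyScore_eq]
  set F := (jobs.filter condB).map pyScore with hF
  set EV := jobs.filter (fun j => !condB j) with hEV
  have hmapo : (jobs.filter condB).map (fun j => (altScore j).1)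
      = F.map Prod.fst := by
    rw [hF, List.map_map]; apply List.map_congr_left; intro j _; simp [hsc j]
  have hmapd : (jobs.filter condB).map (fun j => (altScore j).1 - (altScore j).2)
      = F.map (fun s => s.1 - s.2) := by
    rw [hF, List.map_map]; apply List.map_congr_left; intro j _; simp [hsc j]
  have hmapf : EV.map (fun j => (altScore j).1)
      = EV.map (fun job => (pyScore job).1) := by
    apply List.map_congr_left; intro j _; rw [hsc j]
  have hmapm : EV.map (fun j => if (altScore j).2 ≤ (altScore j).1 then (altScore j).1
        else (altScore j).2)
      = EV.map (fun job => max (pyScore job).1 (pyScore job).2) := by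
    apply List.map_congr_left; intro j _; rw [hsc j, max_def]
    by_cases h : (pyScore j).2 ≤ (pyScore j).1 <;> simp [h] <;> omega
  rw [hmapo, hmapd, hmapf, hmapm]
  set L := PySem.List.sorted F (fun s => s.1 - s.2) with hLdef
  have hLlen : L.length = F.length := PySem.List.length_sorted _ _ _
  have hhalf : PySem.Int.floordiv (L.length : Int) 2 = ((L.length / 2 : Nat) : Int) := by
    exact_mod_cast PySem.Int.floordiv_natCast L.length 2
  rw [hhalf, pyRange_map_getD L (0,0) Prod.snd (L.length / 2) (by omega),
    pyRange_map_getD_from L (0,0) Prod.fst (L.length / 2) (by omega),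
    takeDropSum L (L.length / 2)]
  have hLkey : L.map (fun s : Int × Int => s.1 - s.2) = sortI (F.map (fun s => s.1 - s.2)) := by
    symm
    apply sortI_unique
    · exact (PySem.List.sorted_perm F (fun s : Int × Int => s.1 - s.2) false).map _
    · exact PySem.List.sorted_map_key_pairwise F _
  have hdslen : (F.map (fun s : Int × Int => s.1 - s.2)).length = L.length := by
    simp [hLlen]
  have hdhalf : PySem.Int.floordiv ((F.map (fun s : Int × Int => s.1 - s.2)).length : Int) 2
      = ((L.length / 2 : Nat) : Int) := by
    rw [hdslen]; exact hhalf
  have hsum : ((L.map (fun s : Int × Int => s.1 - s.2)).take (L.length / 2)).sum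
      = sumSmallest (F.map (fun s => s.1 - s.2))
          (PySem.Int.floordiv ((F.map (fun s : Int × Int => s.1 - s.2)).length : Int) 2) := by
    rw [hdhalf, sumSmallest_spec _ _ (by positivity), hLkey, Int.toNat_natCast]
  have hfst : (L.map Prod.fst).sum = (F.map Prod.fst).sum :=
    ((PySem.List.sorted_perm F _ false).map Prod.fst).sum_eq
  by_cases hFnil : F = []
  · have hLnil : L = [] := by
      rw [hLdef]; exact (PySem.List.sorted_eq_nil_iff _ _ _).mpr hFnil
    have hds : F.map (fun s : Int × Int => s.1 - s.2) = [] := by rw [hFnil]; rfl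
    rw [if_neg (by simp [hLnil]), if_neg (by simp [hds])]
    simp [hLnil]
  · have hLne : L ≠ [] := by
      rw [hLdef]; intro hx; exact hFnil ((PySem.List.sorted_eq_nil_iff _ _ _).mp hx)
    have hdsne : F.map (fun s : Int × Int => s.1 - s.2) ≠ [] := by
      intro hx; exact hFnil (List.map_eq_nil_iff.mp hx)
    rw [if_pos hLne, if_pos (by simpa using hdsne)]
    simp only [List.nil_append, zero_add]
    rw [hsum, hfst]
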